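-- pv_equiv track=rewrite | github.com/jtambe/LeetCode | TwoPointers/Aledade_run_length_ordered.py | increasingList
-- ===== SOURCE A (Python) =====
-- from typing import List
--
-- def increasingList(A:List[int], Y:int) -> List[int]:
--     """
--     Returns a list of index numbers for increasing sequence
--     param A: list of values
--     param Y: run length
--     """
--     increasing: List[int] = []
--     l,r, count = 0, 0, 0
--     while (r < len(A)-1):
--         # if consecutive numbers are increasing, we increment the right pointer & counter
--         # once we find increasing run_length, we just move left pointer
--         if (A[r] + 1 == A[r+1]):
--             r += 1
--             count += 1
--             if (count == Y-1):
--                 increasing.append(l)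
--                 count -= 1
--                 l += 1
--         # if consecutive numbers are not increasing, we simply move both pointers
--         # additionally, we mark count = 0 to wipe off counter because of previous run_length data
--         else:
--             r += 1
--             l = r
--             count = 0
--     return increasing
-- ===== SOURCE B (Python) =====
-- from typing import List
--
-- def increasingList(A: List[int], Y: int) -> List[int]:
--     """Start indices of length-Y consecutive (+1) runs, by direct window test."""
--     if Y < 2:
--         return []
--     return [i for i in range(len(A) - Y + 1)
--             if all(A[i + k] + 1 == A[i + k + 1] for k in range(Y - 1))]
-- ===== Notes on version B (the rewrite author's own statement) =====
-- stated objective: simpler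
-- what changed: Replaced the incremental two-pointer/counter sliding scan with a direct per-window comprehension that tests each candidate start index for a consecutive +1 run.
import Mathlib
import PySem

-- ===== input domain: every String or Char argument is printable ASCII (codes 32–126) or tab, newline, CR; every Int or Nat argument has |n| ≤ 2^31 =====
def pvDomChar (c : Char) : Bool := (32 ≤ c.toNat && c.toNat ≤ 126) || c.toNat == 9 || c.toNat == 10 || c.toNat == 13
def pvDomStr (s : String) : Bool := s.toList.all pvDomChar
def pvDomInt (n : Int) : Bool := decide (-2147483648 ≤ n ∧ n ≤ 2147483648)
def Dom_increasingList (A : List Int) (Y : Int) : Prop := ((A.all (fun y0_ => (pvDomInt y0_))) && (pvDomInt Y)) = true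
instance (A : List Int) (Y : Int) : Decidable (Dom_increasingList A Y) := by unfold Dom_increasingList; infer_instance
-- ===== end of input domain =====

-- B replaces A's incremental two-pointer/counter scan with a direct per-window test (simpler, not faster).

-- ===== PORT A =====
-- the while loop, recursing on the decreasing distance len(A)-1-r.
-- A[r] / A[r+1] are ported with pyGetD: whenever Python evaluates them the guard
-- r < len(A)-1 (and r ≥ 0 along every reachable state) puts the index in range, so this is exact.
def increasingListLoop (A : List Int) (Y : Int) (l r count : Int) (inc : List Int) : List Int :=
  if h : r < (A.length : Int) - 1 then
    if PySem.List.pyGetD A r 0 + 1 = PySem.List.pyGetD A (r + 1) 0 then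
      if count + 1 = Y - 1 then
        increasingListLoop A Y (l + 1) (r + 1) (count + 1 - 1) (inc ++ [l])
      else
        increasingListLoop A Y l (r + 1) (count + 1) inc
    else
      increasingListLoop A Y (r + 1) (r + 1) 0 inc
  else inc
termination_by ((A.length : Int) - 1 - r).toNat
decreasing_by all_goals omega

def increasingList (A : List Int) (Y : Int) : List Int :=
  increasingListLoop A Y 0 0 0 []

-- ===== PORT B =====
-- indices i+k, i+k+1 are in range for every i produced by the outer range, so pyGetD is exact.
def increasingList_alt (A : List Int) (Y : Int) : List Int :=
  if Y < 2 then []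
  else
    (PySem.List.pyRange 0 ((A.length : Int) - Y + 1) 1).filter
      (fun i => (PySem.List.pyRange 0 (Y - 1) 1).all
        (fun k => PySem.List.pyGetD A (i + k) 0 + 1 == PySem.List.pyGetD A (i + k + 1) 0))

-- ===== PRECONDITION & SPEC =====
def Spec_increasingList (A : List Int) (Y : Int) (out : List Int) : Prop := out = increasingList_alt A Y
instance (A : List Int) (Y : Int) (out : List Int) : Decidable (Spec_increasingList A Y out) := by unfold Spec_increasingList; infer_instance

-- ===== CLAIM (what is proved, stated in full; the proofs are below) =====
def Claim_equal_increasingList : Prop := ∀ (A : List Int) (Y : Int), Dom_increasingList A Y → Spec_increasingList A Y (increasingList A Y)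

-- ===== LEMMAS AND PROOFS =====

-- window test: positions i..i+Yn-1 form a consecutive +1 run (offset form, matches B)
def pvWb (A : List Int) (Yn i : Nat) : Bool :=
  decide (∀ k, k < Yn - 1 → A.getD (i + k) 0 + 1 = A.getD (i + k + 1) 0)

-- positions a..b form a consecutive +1 run (interval form, matches A's invariant)
def pvRun (A : List Int) (a b : Nat) : Prop :=
  ∀ j, a ≤ j → j < b → A.getD j 0 + 1 = A.getD (j + 1) 0

-- windows still pending at loop head r: full-run starts i with window end i+Yn-1 > r
def pvS (A : List Int) (Yn r : Nat) : List Int :=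
  ((List.range (A.length + 1 - Yn)).filter
    (fun i => pvWb A Yn i && decide (r + 2 ≤ i + Yn))).map Int.ofNat

lemma pvWb_iff_run (A : List Int) (Yn a b : Nat) (h2 : 2 ≤ Yn) (h : b + 1 = a + Yn) :
    pvWb A Yn a = true ↔ pvRun A a b := by
  unfold pvWb pvRun
  simp only [decide_eq_true_eq]
  constructor
  · intro hw j hja hjb
    have hk : j = a + (j - a) := by omega
    have := hw (j - a) (by omega)
    rw [hk]
    have : a + (j - a) + 1 = a + (j - a + 1) := by omega
    simpa using hw (j - a) (by omega)
  · intro hr k hk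
    exact hr (a + k) (by omega) (by omega)

lemma pv_filter_range_nil (m t : Nat) (p : Nat → Bool) (h : m ≤ t) :
    (List.range m).filter (fun i => p i && decide (t ≤ i)) = [] := by
  apply List.filter_eq_nil_iff.mpr
  intro i hi
  have : i < m := List.mem_range.mp hi
  simp only [Bool.and_eq_true, decide_eq_true_eq, not_and]
  intro _
  omega

lemma pv_range_filter_split (m a : Nat) (p : Nat → Bool) :
    (List.range m).filter (fun i => p i && decide (a ≤ i)) =
      (if a < m ∧ p a then [a] else []) ++
        (List.range m).filter (fun i => p i && decide (a + 1 ≤ i)) := by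
  by_cases hlt : a < m
  · have hm : m = a + 1 + (m - a - 1) := by omega
    rw [hm, List.range_add, List.filter_append, List.filter_append,
        List.range_succ, List.filter_append, List.filter_append,
        pv_filter_range_nil a a p (le_refl a),
        pv_filter_range_nil a (a + 1) p (by omega)]
    have hF : (List.filter (fun i => p i && decide (a ≤ i))
          (List.map (fun x => a + 1 + x) (List.range (m - a - 1))))
        = (List.filter (fun i => p i && decide (a + 1 ≤ i))
          (List.map (fun x => a + 1 + x) (List.range (m - a - 1)))) := by
      apply List.filter_congr
      intro i hi
      obtain ⟨x, -, rfl⟩ := List.mem_map.mp hi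
      simp [show a ≤ a + 1 + x from by omega]
    rw [hF]
    simp only [List.filter_cons, List.filter_nil]
    have h1 : (p a && decide (a ≤ a)) = p a := by simp
    have h2 : (p a && decide (a + 1 ≤ a)) = false := by simp
    rw [h1, h2]
    by_cases hpa : p a = true
    · simp [hpa, show a < a + 1 + (m - a - 1) from by omega]
    · simp only [Bool.not_eq_true] at hpa
      simp [hpa]
  · rw [pv_filter_range_nil m a p (by omega), pv_filter_range_nil m (a + 1) p (by omega),
      if_neg (by rintro ⟨h, _⟩; omega), List.nil_append]

-- pvS r versus pvS (r+1): the only candidate window that stops being pending starts at r+2-Yn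
lemma pvS_split (A : List Int) (Yn r : Nat) (_h2 : 2 ≤ Yn) :
    pvS A Yn r =
      (if Yn ≤ r + 2 ∧ r + 2 - Yn < A.length + 1 - Yn ∧ pvWb A Yn (r + 2 - Yn)
        then [((r + 2 - Yn : Nat) : Int)] else []) ++ pvS A Yn (r + 1) := by
  have key : (List.range (A.length + 1 - Yn)).filter
        (fun i => pvWb A Yn i && decide (r + 2 ≤ i + Yn)) =
      (if Yn ≤ r + 2 ∧ r + 2 - Yn < A.length + 1 - Yn ∧ pvWb A Yn (r + 2 - Yn)
        then [r + 2 - Yn] else []) ++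
      (List.range (A.length + 1 - Yn)).filter
        (fun i => pvWb A Yn i && decide (r + 1 + 2 ≤ i + Yn)) := by
    by_cases hc : Yn ≤ r + 2
    · have e1 : ∀ i : Nat, decide (r + 2 ≤ i + Yn) = decide (r + 2 - Yn ≤ i) :=
        fun i => decide_eq_decide.mpr (by omega)
      have e2 : ∀ i : Nat, decide (r + 2 - Yn + 1 ≤ i) = decide (r + 1 + 2 ≤ i + Yn) :=
        fun i => decide_eq_decide.mpr (by omega)
      calc (List.range (A.length + 1 - Yn)).filter
            (fun i => pvWb A Yn i && decide (r + 2 ≤ i + Yn))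
          = (List.range (A.length + 1 - Yn)).filter
            (fun i => pvWb A Yn i && decide (r + 2 - Yn ≤ i)) := by
            apply List.filter_congr; intro i _; rw [e1]
        _ = (if r + 2 - Yn < A.length + 1 - Yn ∧ pvWb A Yn (r + 2 - Yn) then [r + 2 - Yn] else []) ++
            (List.range (A.length + 1 - Yn)).filter
              (fun i => pvWb A Yn i && decide (r + 2 - Yn + 1 ≤ i)) :=
            pv_range_filter_split (A.length + 1 - Yn) (r + 2 - Yn) (pvWb A Yn)
        _ = _ := by
            congr 1
            · apply if_congr _ rfl rfl
              constructor
              · exact fun h => ⟨hc, h.1, h.2⟩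
              · exact fun h => ⟨h.2.1, h.2.2⟩
            · apply List.filter_congr; intro i _; rw [e2]
    · rw [if_neg (by rintro ⟨h, _⟩; omega), List.nil_append]
      apply List.filter_congr
      intro i _
      congr 1
      exact decide_eq_decide.mpr (by omega)
  unfold pvS
  rw [key, List.map_append]
  congr 1
  by_cases hc : Yn ≤ r + 2 ∧ r + 2 - Yn < A.length + 1 - Yn ∧ pvWb A Yn (r + 2 - Yn) = true
  · rw [if_pos hc, if_pos hc, List.map_cons, List.map_nil]
    rfl
  · rw [if_neg hc, if_neg hc, List.map_nil]

lemma pvS_nil (A : List Int) (Yn r : Nat) (h : A.length ≤ r + 1) : pvS A Yn r = [] := by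
  unfold pvS
  rw [List.filter_eq_nil_iff.mpr, List.map_nil]
  intro i hi
  have : i < A.length + 1 - Yn := List.mem_range.mp hi
  simp only [Bool.and_eq_true, decide_eq_true_eq, not_and]
  intro _
  omega

-- main invariant lemma for A's loop, Y ≥ 2
lemma pv_loop_spec (A : List Int) (Y : Int) (hY : 2 ≤ Y) :
    ∀ (n l r : Nat) (inc : List Int), A.length - r ≤ n → l ≤ r → (r : Int) - l ≤ Y - 2 →
      pvRun A l r → (∀ j, j < l → pvRun A j r → (j : Int) + Y ≤ (r : Int) + 1) →
      increasingListLoop A Y l r ((r : Int) - l) inc = inc ++ pvS A Y.toNat r := by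
  intro n
  induction n with
  | zero =>
    intro l r inc hfuel _ _ _ _
    rw [increasingListLoop, dif_neg (by omega)]
    rw [pvS_nil A Y.toNat r (by omega), List.append_nil]
  | succ n ih =>
    intro l r inc hfuel hlr hcap hrun hmax
    have h2 : 2 ≤ Y.toNat := by omega
    by_cases hg : (r : Int) < (A.length : Int) - 1
    · have hrlen : r + 1 < A.length := by omega
      rw [increasingListLoop, dif_pos hg]
      have hgetr : PySem.List.pyGetD A (r : Int) 0 = A.getD r 0 :=
        PySem.List.pyGetD_natCast A r 0
      have hgetr1 : PySem.List.pyGetD A ((r : Int) + 1) 0 = A.getD (r + 1) 0 := by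
        rw [show ((r : Int) + 1) = ((r + 1 : Nat) : Int) from by push_cast; ring]
        exact PySem.List.pyGetD_natCast A (r + 1) 0
      rw [hgetr, hgetr1]
      by_cases hinc : A.getD r 0 + 1 = A.getD (r + 1) 0
      · rw [if_pos hinc]
        have hrun' : pvRun A l (r + 1) := by
          intro j hja hjb
          by_cases hj : j < r
          · exact hrun j hja hj
          · have : j = r := by omega
            rw [this]; exact hinc
        by_cases happ : (r : Int) - l + 1 = Y - 1
        · rw [if_pos happ]
          have hc1 : (r : Int) + 1 = ((r + 1 : Nat) : Int) := by push_cast; ring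
          have hc2 : (l : Int) + 1 = ((l + 1 : Nat) : Int) := by push_cast; ring
          have hc3 : (r : Int) - l + 1 - 1 = ((r + 1 : Nat) : Int) - ((l + 1 : Nat) : Int) := by
            push_cast; ring
          rw [hc1, hc2, hc3]
          rw [ih (l + 1) (r + 1) (inc ++ [(l : Int)]) (by omega) (by omega) (by push_cast; omega)
            (fun j hja hjb => hrun' j (by omega) hjb)
            (by
              intro j hj hrj
              by_cases hjl : j < l
              · have : pvRun A j r := fun k hk1 hk2 => hrj k hk1 (by omega)
                have := hmax j hjl this
                push_cast; omega
              · have : j = l := by omega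
                push_cast [this]; omega)]
          rw [List.append_assoc]
          congr 1
          -- pvS r = l :: pvS (r+1)
          rw [pvS_split A Y.toNat r h2]
          have hla : l = r + 2 - Y.toNat := by omega
          have hcond : Y.toNat ≤ r + 2 ∧ r + 2 - Y.toNat < A.length + 1 - Y.toNat ∧
              pvWb A Y.toNat (r + 2 - Y.toNat) = true := by
            refine ⟨by omega, by omega, ?_⟩
            rw [← hla, pvWb_iff_run A Y.toNat l (r + 1) h2 (by omega)]
            exact hrun'
          rw [if_pos hcond, ← hla]
        · rw [if_neg happ]
          have hcap' : (r : Int) - l + 1 ≤ Y - 2 := by omega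
          have hc1 : (r : Int) + 1 = ((r + 1 : Nat) : Int) := by push_cast; ring
          have hc3 : (r : Int) - l + 1 = ((r + 1 : Nat) : Int) - (l : Int) := by push_cast; ring
          rw [hc1, hc3]
          rw [ih l (r + 1) inc (by omega) (by omega) (by push_cast; omega)
            hrun'
            (by
              intro j hj hrj
              have : pvRun A j r := fun k hk1 hk2 => hrj k hk1 (by omega)
              have := hmax j hj this
              push_cast; omega)]
          congr 1
          rw [pvS_split A Y.toNat r h2]
          by_cases hc : Y.toNat ≤ r + 2 ∧ r + 2 - Y.toNat < A.length + 1 - Y.toNat ∧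
              pvWb A Y.toNat (r + 2 - Y.toNat) = true
          · exfalso
            obtain ⟨hca, hcb, hcw⟩ := hc
            set a := r + 2 - Y.toNat with hadef
            have hal : a < l := by omega
            have hruna : pvRun A a (r + 1) :=
              (pvWb_iff_run A Y.toNat a (r + 1) h2 (by omega)).mp hcw
            have : pvRun A a r := fun k hk1 hk2 => hruna k hk1 (by omega)
            have := hmax a hal this
            omega
          · rw [if_neg hc, List.nil_append]
      · rw [if_neg hinc]
        have hc1 : (r : Int) + 1 = ((r + 1 : Nat) : Int) := by push_cast; ring
        have hc3 : (0 : Int) = ((r + 1 : Nat) : Int) - ((r + 1 : Nat) : Int) := by ring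
        rw [hc1, hc3]
        rw [ih (r + 1) (r + 1) inc (by omega) (by omega) (by omega)
          (fun j hja hjb => absurd (by omega : j < j) (by omega))
          (by
            intro j hj hrj
            exact absurd (hrj r (by omega) (by omega)) hinc)]
        congr 1
        rw [pvS_split A Y.toNat r h2]
        by_cases hc : Y.toNat ≤ r + 2 ∧ r + 2 - Y.toNat < A.length + 1 - Y.toNat ∧
            pvWb A Y.toNat (r + 2 - Y.toNat) = true
        · exfalso
          obtain ⟨hca, hcb, hcw⟩ := hc
          have hruna : pvRun A (r + 2 - Y.toNat) (r + 1) :=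
            (pvWb_iff_run A Y.toNat (r + 2 - Y.toNat) (r + 1) h2 (by omega)).mp hcw
          exact hinc (hruna r (by omega) (by omega))
        · rw [if_neg hc, List.nil_append]
    · rw [increasingListLoop, dif_neg hg]
      rw [pvS_nil A Y.toNat r (by omega), List.append_nil]

-- Y ≤ 1: the counter, always incremented before the test, can never equal Y-1 ≤ 0
lemma pv_loop_nil (A : List Int) (Y : Int) (hY : Y ≤ 1) :
    ∀ (n : Nat) (l count : Int) (r : Nat) (inc : List Int), A.length - r ≤ n → 0 ≤ count →
      increasingListLoop A Y l r count inc = inc := by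
  intro n
  induction n with
  | zero =>
    intro l count r inc hfuel hc
    rw [increasingListLoop, dif_neg (by omega)]
  | succ n ih =>
    intro l count r inc hfuel hc
    by_cases hg : (r : Int) < (A.length : Int) - 1
    · rw [increasingListLoop, dif_pos hg]
      have hc1 : (r : Int) + 1 = ((r + 1 : Nat) : Int) := by push_cast; ring
      have hne : ¬ (count + 1 = Y - 1) := by omega
      split_ifs with h1
      · rw [hc1]; exact ih l (count + 1) (r + 1) inc (by omega) (by omega)
      · rw [hc1]; exact ih ((r : Int) + 1) 0 (r + 1) inc (by omega) (by omega)
    · rw [increasingListLoop, dif_neg hg]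

-- B's filter equals pvS at r = 0
lemma pv_alt_eq_pvS (A : List Int) (Y : Int) (hY : 2 ≤ Y) :
    increasingList_alt A Y = pvS A Y.toNat 0 := by
  unfold increasingList_alt
  rw [if_neg (by omega)]
  rw [PySem.List.pyRange_one 0 ((A.length : Int) - Y + 1)]
  have hm : (((A.length : Int) - Y + 1) - 0).toNat = A.length + 1 - Y.toNat := by omega
  rw [hm, List.filter_map]
  unfold pvS
  rw [show (fun k : Nat => (0 : Int) + ↑k) = Int.ofNat from by funext k; simp]
  have h2 : 2 ≤ Y.toNat := by omega
  congr 1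
  apply List.filter_congr
  intro i hi
  have hilt : i < A.length + 1 - Y.toNat := List.mem_range.mp hi
  simp only [Function.comp_apply]
  have hpend : decide (0 + 2 ≤ i + Y.toNat) = true := by simp; omega
  rw [hpend, Bool.and_true]
  -- inner all over range(Y-1)
  rw [PySem.List.pyRange_one 0 (Y - 1)]
  have hym : ((Y - 1) - (0 : Int)).toNat = Y.toNat - 1 := by omega
  rw [hym, List.all_map]
  unfold pvWb
  rw [Bool.eq_iff_iff, List.all_eq_true, decide_eq_true_iff]
  constructor
  · intro h k hk
    have hmem := h k (List.mem_range.mpr hk)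
    simp only [Function.comp_apply, beq_iff_eq, Int.ofNat_eq_natCast] at hmem
    rw [show (i : Int) + (0 + (k : Int)) = ((i + k : Nat) : Int) from by omega] at hmem
    rw [show ((i + k : Nat) : Int) + 1 = ((i + k + 1 : Nat) : Int) from by omega] at hmem
    rw [PySem.List.pyGetD_natCast, PySem.List.pyGetD_natCast] at hmem
    exact hmem
  · intro h k hk
    have hk' : k < Y.toNat - 1 := List.mem_range.mp hk
    simp only [Function.comp_apply, beq_iff_eq, Int.ofNat_eq_natCast]
    rw [show (i : Int) + (0 + (k : Int)) = ((i + k : Nat) : Int) from by omega]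
    rw [show ((i + k : Nat) : Int) + 1 = ((i + k + 1 : Nat) : Int) from by omega]
    rw [PySem.List.pyGetD_natCast, PySem.List.pyGetD_natCast]
    exact h k hk'

-- ===== VERDICT (by name: the statement is the Claim_ definition above) =====
theorem increasingList_spec : Claim_equal_increasingList := by
  unfold Claim_equal_increasingList Spec_increasingList
  intro A Y _
  by_cases hY : Y < 2
  · unfold increasingList increasingList_alt
    rw [if_pos hY]
    have h0 : ((0 : Nat) : Int) = (0 : Int) := by norm_num
    have := pv_loop_nil A Y (by omega) A.length 0 0 0 [] (by omega) (by omega)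
    simpa using this
  · have hY2 : 2 ≤ Y := by omega
    unfold increasingList
    have h0 : (0 : Int) = ((0 : Nat) : Int) - ((0 : Nat) : Int) := by norm_num
    rw [pv_alt_eq_pvS A Y hY2]
    have := pv_loop_spec A Y hY2 A.length 0 0 [] (by omega) (by omega) (by omega)
      (fun j hja hjb => absurd hjb (by omega)) (fun j hj _ => absurd hj (by omega))
    simpa using this
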